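-- pv_equiv track=rewrite | github.com/Daniel-Berger/AI-Curriculum | Python-Learning/05-llms-and-genai/04-prompt-engineering/solutions.py | generate_prompt_variants
-- ===== SOURCE A (Python) =====
-- from itertools import product
--
-- def generate_prompt_variants(
--     base_prompt: str,
--     variations: dict[str, list[str]],
-- ) -> list[str]:
--     """
--     Generate multiple prompt variants by substituting different values.
--     """
--     if not variations:
--         return [base_prompt]
--
--     # Get all keys and their values
--     keys = list(variations.keys())
--     value_lists = [variations[key] for key in keys]
--
--     # Generate all combinations
--     variants = []
--     for combination in product(*value_lists):
--         prompt = base_prompt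
--         for key, value in zip(keys, combination):
--             prompt = prompt.replace(f"{{{key}}}", value)
--         variants.append(prompt)
--
--     return variants
-- ===== SOURCE B (Python) =====
-- def generate_prompt_variants(
--     base_prompt: str,
--     variations: dict[str, list[str]],
-- ) -> list[str]:
--     """
--     Generate multiple prompt variants by substituting different values.
--     """
--     # Fold over the keys: no product tuples, the variant list is grown key by key.
--     variants = [base_prompt]
--     for key in variations:
--         values = variations[key]
--         variants = [p.replace("{" + key + "}", v) for p in variants for v in values]
--     return variants
-- ===== Notes on version B (the rewrite author's own statement) =====
-- stated objective: simpler
-- what changed: Replaces itertools.product enumeration of full key-combination tuples (then a zip+replace loop per tuple) with an incremental fold over the keys that rebuilds the variant list by one substitution at a time; the empty-variations guard disappears because the fold returns [base_prompt] by itself.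
import Mathlib
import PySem

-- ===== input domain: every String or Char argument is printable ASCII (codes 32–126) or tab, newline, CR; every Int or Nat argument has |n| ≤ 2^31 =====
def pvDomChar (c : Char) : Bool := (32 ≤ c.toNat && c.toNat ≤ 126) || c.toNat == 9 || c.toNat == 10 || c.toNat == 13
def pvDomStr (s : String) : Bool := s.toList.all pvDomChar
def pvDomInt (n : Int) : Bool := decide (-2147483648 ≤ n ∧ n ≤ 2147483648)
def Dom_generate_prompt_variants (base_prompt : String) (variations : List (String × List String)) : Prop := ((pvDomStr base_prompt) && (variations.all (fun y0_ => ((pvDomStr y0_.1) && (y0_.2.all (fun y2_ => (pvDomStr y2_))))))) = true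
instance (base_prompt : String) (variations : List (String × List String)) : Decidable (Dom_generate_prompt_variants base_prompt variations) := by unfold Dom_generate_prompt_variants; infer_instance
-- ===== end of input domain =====

-- B replaces the product-of-tuples enumeration with a fold over keys that grows the
-- variant list one substitution at a time; return values are proved equal everywhere.

-- variations[key]: first-match lookup in the association list (exact dict semantics;
-- in A the key always comes from the dict itself, so the [] default is never used).
def pvLookup (variations : List (String × List String)) (k : String) : List String :=
  (List.lookup k variations).getD []

-- ===== PORT A =====
-- itertools.product over a list of value lists (first list varies slowest)
def pvProduct : List (List String) → List (List String)
  | [] => [[]]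
  | l :: ls => l.flatMap (fun v => (pvProduct ls).map (fun c => v :: c))

def generate_prompt_variants (base_prompt : String) (variations : List (String × List String)) : List String :=
  if variations.isEmpty then [base_prompt]
  else
    let keys := variations.map (·.1)
    let value_lists := keys.map (fun k => pvLookup variations k)
    (pvProduct value_lists).foldl
      (fun acc comb =>
        acc ++ [(keys.zip comb).foldl
          (fun prompt kv => PySem.Str.replace prompt ("{" ++ kv.1 ++ "}") kv.2) base_prompt])
      []

-- ===== PORT B =====
def generate_prompt_variants_alt (base_prompt : String) (variations : List (String × List String)) : List String :=
  (variations.map (·.1)).foldl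
    (fun variants k =>
      variants.flatMap (fun p =>
        (pvLookup variations k).map (fun v => PySem.Str.replace p ("{" ++ k ++ "}") v)))
    [base_prompt]

-- ===== PRECONDITION & SPEC =====
def Spec_generate_prompt_variants (base_prompt : String) (variations : List (String × List String)) (out : List String) : Prop := out = generate_prompt_variants_alt base_prompt variations
instance (base_prompt : String) (variations : List (String × List String)) (out : List String) : Decidable (Spec_generate_prompt_variants base_prompt variations out) := by unfold Spec_generate_prompt_variants; infer_instance

-- ===== CLAIM (what is proved, stated in full; the proofs are below) =====
def Claim_equal_generate_prompt_variants : Prop := ∀ (base_prompt : String) (variations : List (String × List String)), Dom_generate_prompt_variants base_prompt variations → Spec_generate_prompt_variants base_prompt variations (generate_prompt_variants base_prompt variations)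

-- ===== LEMMAS AND PROOFS =====

-- the key fold of B, started from any list L, enumerates the product of the value
-- lists and applies the per-combination sequential substitution of A
lemma pv_fold_eq (valOf : String → List String) (rep : String → String → String → String)
    (ks : List String) (L : List String) :
    ks.foldl (fun acc k => acc.flatMap (fun p => (valOf k).map (fun v => rep p k v))) L
      = L.flatMap (fun p => (pvProduct (ks.map valOf)).map
          (fun comb => (ks.zip comb).foldl (fun q kv => rep q kv.1 kv.2) p)) := by
  induction ks generalizing L with
  | nil => simp [pvProduct]
  | cons k ks ih =>
    simp only [List.foldl_cons, ih, pvProduct, List.map_cons]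
    rw [List.flatMap_assoc]
    congr 1
    funext p
    rw [List.flatMap_map, List.map_flatMap]
    congr 1
    funext v
    simp [Function.comp]

lemma pv_flatMap_single {α β : Type} (l : List α) (f : α → β) :
    l.flatMap (fun x => [f x]) = l.map f := by
  induction l with
  | nil => rfl
  | cons a l ih => rw [List.flatMap_cons, List.map_cons, ih]; rfl

-- ===== VERDICT (by name: the statement is the Claim_ definition above) =====
theorem generate_prompt_variants_spec : Claim_equal_generate_prompt_variants := by
  intro base_prompt variations _
  unfold Spec_generate_prompt_variants generate_prompt_variants generate_prompt_variants_alt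
  rw [pv_fold_eq]
  rcases variations with _ | ⟨kv, rest⟩
  · simp [pvProduct]
  · rw [if_neg (by simp)]
    rw [PySem.List.foldl_append_eq_flatMap
      (g := fun comb => [((kv :: rest).map (·.1)).zip comb |>.foldl
        (fun prompt x => PySem.Str.replace prompt ("{" ++ x.1 ++ "}") x.2) base_prompt])]
    simp only [List.nil_append, List.flatMap_cons, List.flatMap_nil, List.append_nil]
    exact pv_flatMap_single ..
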